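-- pv_equiv track=rewrite | github.com/ziemowit141/CSP-LatinSquare | Piramids.py | piramid_checker
-- ===== SOURCE A (Python) =====
-- def piramid_checker(values):
--     prev = [0]
--     seen = 0
--     for val in values:
--         if val > max(prev):
--             seen += 1
--         prev.append(val)
--
--     return seen
-- ===== SOURCE B (Python) =====
-- def piramid_checker(values):
--     # Build the prefix-maximum table (prefixes[i] == max(0, values[:i])) in one
--     # O(n) pass, then count in a separate pass; A recomputes max(prev) each step (O(n^2)).
--     prefixes = []
--     cur = 0
--     for v in values:
--         prefixes.append(cur)
--         if v > cur:
--             cur = v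
--     return sum(1 for v, p in zip(values, prefixes) if v > p)
-- ===== Notes on version B (the rewrite author's own statement) =====
-- stated objective: faster
-- what changed: B builds the prefix-maximum table in one pass and counts in a separate zip pass, instead of A's single loop that recomputes max(prev) over the growing list at every step.
import Mathlib
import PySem

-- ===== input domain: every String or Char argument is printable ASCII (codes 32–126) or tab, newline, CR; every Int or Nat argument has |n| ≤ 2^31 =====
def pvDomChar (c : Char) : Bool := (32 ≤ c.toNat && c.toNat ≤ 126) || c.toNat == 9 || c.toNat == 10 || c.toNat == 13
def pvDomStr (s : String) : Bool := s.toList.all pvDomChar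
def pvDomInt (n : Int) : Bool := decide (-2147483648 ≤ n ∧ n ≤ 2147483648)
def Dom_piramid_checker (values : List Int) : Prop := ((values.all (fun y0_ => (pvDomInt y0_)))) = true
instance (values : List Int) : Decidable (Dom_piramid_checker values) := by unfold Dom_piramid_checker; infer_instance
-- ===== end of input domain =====

-- B builds the prefix-maximum table in one pass and counts in a separate zip pass,
-- replacing A's loop that recomputes max(prev) over the growing list at every step (faster).

-- ===== PORT A =====
-- loop state: (prev, seen); max(prev) is Python's max on a nonempty list (PySem.List.max?).
def piramid_checker (values : List Int) : Int :=
  (values.foldl (fun (st : List Int × Int) val =>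
      (st.1 ++ [val],
       if val > ((PySem.List.max? st.1 (fun y => y)).getD 0) then st.2 + 1 else st.2))
    ([0], 0)).2

-- ===== PORT B =====
-- first pass: build (prefixes, cur); second pass: count v > p over zip values prefixes.
def piramid_checker_alt (values : List Int) : Int :=
  let st := values.foldl (fun (st : List Int × Int) v =>
      (st.1 ++ [st.2], if v > st.2 then v else st.2)) (([] : List Int), 0)
  (((values.zip st.1).countP (fun vp => decide (vp.1 > vp.2)) : Nat) : Int)

-- ===== PRECONDITION & SPEC =====
def Spec_piramid_checker (values : List Int) (out : Int) : Prop := out = piramid_checker_alt values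
instance (values : List Int) (out : Int) : Decidable (Spec_piramid_checker values out) := by unfold Spec_piramid_checker; infer_instance

-- ===== CLAIM (what is proved, stated in full; the proofs are below) =====
def Claim_equal_piramid_checker : Prop := ∀ (values : List Int), Dom_piramid_checker values → Spec_piramid_checker values (piramid_checker values)

-- ===== LEMMAS AND PROOFS =====

-- reference: count of values exceeding the running maximum m
def pvCnt (m : Int) : List Int → Int
  | [] => 0
  | v :: vs => (if v > m then 1 else 0) + pvCnt (if v > m then v else m) vs

-- reference prefix-maximum table starting at cur
def pvPref (cur : Int) : List Int → List Int
  | [] => []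
  | v :: vs => cur :: pvPref (if v > cur then v else cur) vs

lemma pvA_loop (vs : List Int) : ∀ (x : Int) (t : List Int) (seen : Int),
    (vs.foldl (fun (st : List Int × Int) val =>
        (st.1 ++ [val],
         if val > ((PySem.List.max? st.1 (fun y => y)).getD 0) then st.2 + 1 else st.2))
      (x :: t, seen)).2 = seen + pvCnt (t.foldl max x) vs := by
  induction vs with
  | nil => intro x t seen; simp [pvCnt]
  | cons v vs ih =>
    intro x t seen
    have hmax : PySem.List.max? (x :: t) (fun y => y) = some (t.foldl max x) :=
      PySem.List.max?_id_cons x t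
    have hstep : (t ++ [v]).foldl max x = if v > t.foldl max x then v else t.foldl max x := by
      rw [List.foldl_append]; simp [List.foldl]; omega
    simp only [List.foldl_cons, List.cons_append, hmax, Option.getD_some]
    rw [ih x (t ++ [v]), hstep]
    by_cases h : v > t.foldl max x <;> simp [pvCnt, h] <;> ring

lemma pvB_fold (vs : List Int) : ∀ (acc : List Int) (cur : Int),
    (vs.foldl (fun (st : List Int × Int) v =>
        (st.1 ++ [st.2], if v > st.2 then v else st.2)) (acc, cur)).1
      = acc ++ pvPref cur vs := by
  induction vs with
  | nil => intro acc cur; simp [pvPref]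
  | cons v vs ih =>
    intro acc cur
    simp only [List.foldl_cons]
    rw [ih]
    simp [pvPref]

lemma pvB_count (vs : List Int) : ∀ (cur : Int),
    (((vs.zip (pvPref cur vs)).countP (fun vp => decide (vp.1 > vp.2)) : Nat) : Int)
      = pvCnt cur vs := by
  induction vs with
  | nil => intro cur; simp [pvPref, pvCnt]
  | cons v vs ih =>
    intro cur
    simp only [pvPref, pvCnt, List.zip_cons_cons, List.countP_cons]
    rw [← ih (if v > cur then v else cur)]
    by_cases h : v > cur <;> simp [h] <;> ring

-- ===== VERDICT (by name: the statement is the Claim_ definition above) =====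
theorem piramid_checker_spec : Claim_equal_piramid_checker := by
  intro values _
  unfold Spec_piramid_checker piramid_checker piramid_checker_alt
  rw [pvA_loop values 0 [] 0]
  simp only [pvB_fold values [] 0, List.nil_append, pvB_count values 0, List.foldl]
  omega
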